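-- pv_equiv track=rewrite | github.com/j-gimbel/Corona | rki-analyze.py | collisionStats
-- ===== SOURCE A (Python) =====
-- def collisionStats(hashedMessages):
--     colStat = {}
--     for hash in hashedMessages.keys():
--         hashGroup = hashedMessages[hash]
--         hl = len(hashGroup)
--         if hl > 1:
--             if hl not in colStat:
--                 colStat[hl] = 1
--             else:
--                 colStat[hl] = colStat[hl]+1
--
--     return colStat
-- ===== SOURCE B (Python) =====
-- def collisionStats(hashedMessages):
--     sizes = [len(g) for g in hashedMessages.values()]
--
--     def merge(x, y):
--         out = dict(x)
--         for k, v in y.items():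
--             out[k] = out.get(k, 0) + v
--         return out
--
--     def solve(a):
--         if len(a) == 0:
--             return {}
--         if len(a) == 1:
--             return {a[0]: 1} if a[0] > 1 else {}
--         mid = len(a) // 2
--         return merge(solve(a[:mid]), solve(a[mid:]))
--
--     return solve(sizes)
-- ===== Notes on version B (the rewrite author's own statement) =====
-- stated objective: alternative
-- what changed: Replaces A's single left-to-right dict-counting loop by a divide-and-conquer recursion: the list of group sizes is split in half, each half's size-frequency dict is computed recursively, and the two dicts are merged by adding counts (merge order reproduces dict insertion order).
import Mathlib
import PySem

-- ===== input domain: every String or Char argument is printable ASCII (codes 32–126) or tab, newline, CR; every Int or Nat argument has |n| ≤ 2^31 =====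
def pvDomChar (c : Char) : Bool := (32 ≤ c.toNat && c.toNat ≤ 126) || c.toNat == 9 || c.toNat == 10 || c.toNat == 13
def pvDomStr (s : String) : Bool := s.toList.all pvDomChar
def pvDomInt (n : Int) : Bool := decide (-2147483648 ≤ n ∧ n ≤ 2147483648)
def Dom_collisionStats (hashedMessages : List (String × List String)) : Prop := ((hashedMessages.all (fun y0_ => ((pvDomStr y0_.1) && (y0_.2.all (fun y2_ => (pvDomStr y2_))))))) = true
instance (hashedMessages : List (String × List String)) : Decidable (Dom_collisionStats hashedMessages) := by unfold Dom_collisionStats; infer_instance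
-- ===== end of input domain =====

-- B replaces A's single dict-counting loop by divide-and-conquer on the size list
-- (count each half recursively, merge the two count dicts by adding); objective: alternative.

-- ===== PORT A =====
-- for hash in keys(): group = d[hash]; hl = len(group); if hl > 1: insert-1 / increment
def collisionStats (hashedMessages : List (String × List String)) : List (Int × Int) :=
  (hashedMessages.foldl (fun (colStat : PySem.Dict Int Int) p =>
      let hl : Int := (p.2.length : Int)
      if hl > 1 then
        if ¬ colStat.contains hl then colStat.insert hl 1
        else colStat.insert hl (colStat.getD hl 0 + 1)
      else colStat) PySem.Dict.empty).items

-- ===== PORT B =====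
-- merge(x, y): out = dict(x); for k, v in y.items(): out[k] = out.get(k, 0) + v
def csMerge (x y : PySem.Dict Int Int) : PySem.Dict Int Int :=
  y.items.foldl (fun out kv => out.insert kv.1 (out.getD kv.1 0 + kv.2)) x

-- solve(a): halves at mid = len(a) // 2 (len(a) ≥ 0, so Python's // is Nat division;
-- a[:mid] / a[mid:] are take/drop for this in-range bound, PySem.List.slice_to_natCast /
-- slice_from_natCast; a[0] is read under len(a) == 1, so getD 0 is exact)
def csSolve (a : List Int) : PySem.Dict Int Int :=
  if a.length = 0 then PySem.Dict.empty
  else if a.length = 1 then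
    (if a.getD 0 0 > 1 then PySem.Dict.empty.insert (a.getD 0 0) 1 else PySem.Dict.empty)
  else
    csMerge (csSolve (a.take (a.length / 2))) (csSolve (a.drop (a.length / 2)))
termination_by a.length
decreasing_by
  · simp only [List.length_take]; omega
  · simp only [List.length_drop]; omega

def collisionStats_alt (hashedMessages : List (String × List String)) : List (Int × Int) :=
  (csSolve (hashedMessages.map (fun p => ((p.2.length : Int))))).items

-- ===== PRECONDITION & SPEC =====
def Spec_collisionStats (hashedMessages : List (String × List String)) (out : List (Int × Int)) : Prop := out = collisionStats_alt hashedMessages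
instance (hashedMessages : List (String × List String)) (out : List (Int × Int)) : Decidable (Spec_collisionStats hashedMessages out) := by unfold Spec_collisionStats; infer_instance

-- ===== CLAIM (what is proved, stated in full; the proofs are below) =====
def Claim_equal_collisionStats : Prop := ∀ (hashedMessages : List (String × List String)), Dom_collisionStats hashedMessages → Spec_collisionStats hashedMessages (collisionStats hashedMessages)

-- ===== LEMMAS AND PROOFS =====

-- A's loop body equals the canonical counter step.
theorem collisionStats_body_eq :
    (fun (colStat : PySem.Dict Int Int) (p : String × List String) =>
      let hl : Int := (p.2.length : Int)
      if hl > 1 then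
        if ¬ colStat.contains hl then colStat.insert hl 1
        else colStat.insert hl (colStat.getD hl 0 + 1)
      else colStat)
    = (fun (colStat : PySem.Dict Int Int) p =>
        if ((p.2.length : Int)) > 1 then
          colStat.insert ((p.2.length : Int)) (colStat.getD ((p.2.length : Int)) 0 + 1)
        else colStat) := by
  funext colStat p
  by_cases h1 : (((p.2.length : Int)) > 1)
  · simp only [h1, if_pos]
    split_ifs with h
    · rfl
    · have hc : colStat.contains ((p.2.length : Int)) = false := by simpa using h
      rw [PySem.Dict.getD_of_not_contains colStat 0 hc]
      norm_num
  · simp [h1]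

-- Folding the counter step over the pair list is folding it over the filtered size list.
theorem collisionStats_foldl_filter (xs : List (String × List String))
    (d : PySem.Dict Int Int) :
    xs.foldl (fun (colStat : PySem.Dict Int Int) p =>
        if ((p.2.length : Int)) > 1 then
          colStat.insert ((p.2.length : Int)) (colStat.getD ((p.2.length : Int)) 0 + 1)
        else colStat) d
      = ((xs.map (fun p => ((p.2.length : Int)))).filter (fun hl => hl > 1)).foldl
          (fun (colStat : PySem.Dict Int Int) hl => colStat.insert hl (colStat.getD hl 0 + 1)) d := by
  induction xs generalizing d with
  | nil => rfl
  | cons p xs ih =>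
    simp only [List.foldl_cons, List.map_cons]
    by_cases h : (((p.2.length : Int)) > 1)
    · rw [List.filter_cons_of_pos (by simpa using h)]
      simp only [h, if_pos, List.foldl_cons]
      exact ih _
    · rw [List.filter_cons_of_neg (by simpa using h)]
      simp only [h, if_false]
      exact ih _

-- getD after folding the add-step over a pair list: sum of the values at that key.
theorem getD_foldl_add (ps : List (Int × Int)) (d : PySem.Dict Int Int) (k : Int) :
    (ps.foldl (fun out kv => out.insert kv.1 (out.getD kv.1 0 + kv.2)) d).getD k 0
      = d.getD k 0 + ((ps.filter (fun p => p.1 == k)).map (·.2)).sum := by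
  induction ps generalizing d with
  | nil => simp
  | cons p ps ih =>
    simp only [List.foldl_cons]
    rw [ih]
    by_cases h : p.1 = k
    · rw [List.filter_cons_of_pos (by simpa using h)]
      rw [PySem.Dict.getD_insert]
      simp [h]
      ring
    · rw [List.filter_cons_of_neg (by simpa using h)]
      rw [PySem.Dict.getD_insert]
      simp [Ne.symm h]

-- Folding the add-step over Counter(y)'s items equals folding the count-one step over y.
theorem csMerge_counter (y : List Int) (d : PySem.Dict Int Int) (hd : d.keys.Nodup) :
    csMerge d (PySem.Dict.counter y)
      = y.foldl (fun out s => out.insert s (out.getD s 0 + 1)) d := by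
  unfold csMerge
  apply PySem.Dict.ext
  have hnl : ((PySem.Dict.counter y).items.foldl
      (fun out kv => out.insert kv.1 (out.getD kv.1 0 + kv.2)) d).keys.Nodup :=
    PySem.Dict.nodup_keys_foldl_insert_key _ (fun kv : Int × Int => kv.1) _ _ hd
  have hnr : (y.foldl (fun out s => out.insert s (out.getD s 0 + 1)) d).keys.Nodup :=
    PySem.Dict.nodup_keys_foldl_insert _ _ _ hd
  rw [PySem.Dict.items_eq_map_keys _ hnl 0, PySem.Dict.items_eq_map_keys _ hnr 0]
  have hkeys : ((PySem.Dict.counter y).items.foldl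
      (fun out kv => out.insert kv.1 (out.getD kv.1 0 + kv.2)) d).keys
      = (y.foldl (fun out s => out.insert s (out.getD s 0 + 1)) d).keys := by
    rw [PySem.Dict.keys_foldl_insert_key, PySem.Dict.keys_foldl_insert]
    have : (PySem.Dict.counter y).items.map (fun kv : Int × Int => kv.1)
        = (PySem.Dict.counter y).keys := rfl
    rw [this, PySem.Dict.keys_counter]
    -- Set.update with the deduplicated list equals Set.update with the list itself
    rw [PySem.Set.update_eq_append_filter, PySem.Set.update_eq_append_filter,
      PySem.Set.ofList_ofList]
  rw [hkeys]
  apply List.map_congr_left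
  intro k _
  have hget : ((PySem.Dict.counter y).items.foldl
      (fun out kv => out.insert kv.1 (out.getD kv.1 0 + kv.2)) d).getD k 0
      = (y.foldl (fun out s => out.insert s (out.getD s 0 + 1)) d).getD k 0 := by
    rw [getD_foldl_add, PySem.Dict.getD_foldl_insert_add_one, PySem.Dict.items_counter]
    congr 1
    rw [List.filter_map]
    by_cases hk : k ∈ y
    · have : (PySem.Set.ofList y).filter ((fun p : Int × Int => p.1 == k) ∘ (fun k => (k, (y.count k : Int)))) = [k] := by
        have hmem : k ∈ PySem.Set.ofList y := (PySem.Set.mem_ofList y k).2 hk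
        have hnd : (PySem.Set.ofList y).Nodup := PySem.Set.nodup_ofList y
        rw [show ((fun p : Int × Int => p.1 == k) ∘ (fun k => (k, (y.count k : Int)))) = (fun x : Int => x == k) from rfl]
        rw [List.filter_beq]
        rw [List.count_eq_one_of_mem hnd hmem]
        simp
      rw [this]; simp
    · have hc0 : y.count k = 0 := List.count_eq_zero.2 hk
      have : (PySem.Set.ofList y).filter ((fun p : Int × Int => p.1 == k) ∘ (fun k => (k, (y.count k : Int)))) = [] := by
        rw [List.filter_eq_nil_iff]
        intro x hx
        have hxy : x ∈ y := (PySem.Set.mem_ofList y x).1 hx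
        simp only [Function.comp]
        intro h
        have : x = k := by simpa using h
        exact hk (this ▸ hxy)
      rw [this]; simp [hc0]
  rw [hget]

-- Counting a concatenation continues the fold.
theorem counter_append (x z : List Int) :
    PySem.Dict.counter (x ++ z)
      = z.foldl (fun out s => out.insert s (out.getD s 0 + 1)) (PySem.Dict.counter x) := by
  rw [← PySem.Dict.foldl_insert_getD_add_one_eq_counter,
      ← PySem.Dict.foldl_insert_getD_add_one_eq_counter, List.foldl_append]

-- The divide-and-conquer solve computes the counter of the filtered list.
theorem csSolve_eq (a : List Int) :
    csSolve a = PySem.Dict.counter (a.filter (fun s => s > 1)) := by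
  have H : ∀ n (a : List Int), a.length = n →
      csSolve a = PySem.Dict.counter (a.filter (fun s => s > 1)) := by
    intro n
    induction n using Nat.strong_induction_on with
    | _ n ih =>
      intro a ha
      rw [csSolve]
      by_cases h0 : a.length = 0
      · rw [if_pos h0]
        rw [List.length_eq_zero_iff.1 h0]
        rfl
      · rw [if_neg h0]
        by_cases h1 : a.length = 1
        · rw [if_pos h1]
          obtain ⟨s, rfl⟩ : ∃ s, a = [s] := by
            match a, h1 with
            | [s], _ => exact ⟨s, rfl⟩
          by_cases hs : s > 1
          · rw [if_pos (by simpa using hs)]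
            rw [List.filter_cons_of_pos (by simpa using hs), List.filter_nil]
            rw [← PySem.Dict.foldl_insert_getD_add_one_eq_counter]
            simp [PySem.Dict.getD_empty]
          · rw [if_neg (by simpa using hs)]
            rw [List.filter_cons_of_neg (by simpa using hs), List.filter_nil]
            rfl
        · rw [if_neg h1]
          have h2 : 2 ≤ a.length := by omega
          have hmid1 : 1 ≤ a.length / 2 := by omega
          have hmid2 : a.length / 2 < a.length := by omega
          rw [ih (a.take (a.length / 2)).length
                (by simp only [List.length_take]; omega) _ rfl,
              ih (a.drop (a.length / 2)).length
                (by simp only [List.length_drop]; omega) _ rfl]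
          rw [csMerge_counter _ _ (PySem.Dict.nodup_keys_counter _)]
          rw [← counter_append, ← List.filter_append, List.take_append_drop]
  exact H a.length a rfl

-- ===== VERDICT (by name: the statement is the Claim_ definition above) =====
theorem collisionStats_spec : Claim_equal_collisionStats := by
  intro hm _
  show collisionStats hm = collisionStats_alt hm
  unfold collisionStats collisionStats_alt
  rw [collisionStats_body_eq, collisionStats_foldl_filter, csSolve_eq,
    PySem.Dict.foldl_insert_getD_add_one_eq_counter]
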